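-- pv_equiv track=rewrite | github.com/Tsuchinotama/LoL_Simulator | Worlds_Simulator/Worlds_2020_Simulator/Lol_Worlds2020_Simulator_full_head_to_head.py | all_ties_main
-- ===== SOURCE A (Python) =====
-- def all_ties_main(results_group) :
--     list_results_group = list(results_group.items())
--     list_ties = []
--     i = 0
--     while i < 4 :
--         res_team = list_results_group[i]
--         teams_tied = ([i + 1], [res_team[0]])
--         j = i + 1
--         while j < 4 and (len(res_team[1]) == len(list_results_group[j][1])) :
--             teams_tied[0].append(j + 1)
--             teams_tied[1].append(list_results_group[j][0])
--             j = j + 1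
--         list_ties.append(teams_tied)
--         i = j
--     return list_ties
-- ===== SOURCE B (Python) =====
-- def all_ties_main(results_group):
--     # label-and-bucket: mark break points, prefix-sum them into group labels,
--     # then collect each group by filtering on its label (no run scanning)
--     items = [list(results_group.items())[k] for k in range(4)]
--     breaks = [k == 0 or len(items[k][1]) != len(items[k - 1][1]) for k in range(4)]
--     labels = [sum(breaks[:k + 1]) for k in range(4)]
--     return [([k + 1 for k in range(4) if labels[k] == g],
--              [items[k][0] for k in range(4) if labels[k] == g])
--             for g in range(1, labels[3] + 1)]
-- ===== Notes on version B (the rewrite author's own statement) =====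
-- stated objective: alternative
-- what changed: Replaces A's anchor-and-jump nested while loops with a label-and-bucket scheme: a pass marks break points where the score-list length changes, a prefix sum turns them into group labels, and each group is then collected by filtering all four positions on its label.
import Mathlib
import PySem

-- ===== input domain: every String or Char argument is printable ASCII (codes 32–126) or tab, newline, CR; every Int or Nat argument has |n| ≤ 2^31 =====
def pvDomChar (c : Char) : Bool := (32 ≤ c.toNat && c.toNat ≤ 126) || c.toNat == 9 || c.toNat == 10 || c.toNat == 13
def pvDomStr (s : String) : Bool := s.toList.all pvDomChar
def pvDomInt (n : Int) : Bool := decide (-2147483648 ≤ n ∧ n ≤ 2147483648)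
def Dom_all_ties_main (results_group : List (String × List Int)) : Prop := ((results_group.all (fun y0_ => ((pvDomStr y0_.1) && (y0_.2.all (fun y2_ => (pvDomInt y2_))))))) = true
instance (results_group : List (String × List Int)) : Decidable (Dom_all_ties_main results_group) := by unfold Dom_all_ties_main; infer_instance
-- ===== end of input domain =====

-- B replaces A's anchor-and-jump nested while loops by a label-and-bucket scheme (break flags,
-- prefix-sum labels, filter per label); same return value on every admitted input.

-- ===== PORT A =====
-- list_results_group[i] (in range on every access under Pre_, so the default is never read there)
def pvAget (L : List (String × List Int)) (i : Int) : String × List Int :=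
  (PySem.List.pyGet? L i).getD ("", [])

-- inner while 'j < 4 and len(res_team[1]) == len(list_results_group[j][1])';
-- fuel 4 is a pure totality guard: j starts ≥ 1 and grows, so at most 3 iterations happen
def all_ties_innerA (L : List (String × List Int)) (res_team : String × List Int)
    (tied : List Int × List String) (j : Int) : Nat → (List Int × List String) × Int
  | 0 => (tied, j)
  | fuel + 1 =>
    if j < 4 ∧ res_team.2.length = (pvAget L j).2.length then
      all_ties_innerA L res_team (tied.1 ++ [j + 1], tied.2 ++ [(pvAget L j).1]) (j + 1) fuel
    else (tied, j)

-- outer while 'i < 4', i jumps to the inner loop's final j;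
-- fuel 4 is a pure totality guard: i grows by at least 1 per iteration
def all_ties_outerA (L : List (String × List Int))
    (list_ties : List (List Int × List String)) (i : Int) : Nat → List (List Int × List String)
  | 0 => list_ties
  | fuel + 1 =>
    if i < 4 then
      let res_team := pvAget L i
      let r := all_ties_innerA L res_team ([i + 1], [res_team.1]) (i + 1) 4
      all_ties_outerA L (list_ties ++ [r.1]) r.2 fuel
    else list_ties

def all_ties_main (results_group : List (String × List Int)) : List (List Int × List String) :=
  all_ties_outerA results_group [] 0 4

-- ===== PORT B =====
-- list(results_group.items())[k] (in range under Pre_, so the default is never read there)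
def pvBget (L : List (String × List Int)) (k : Nat) : String × List Int :=
  (PySem.List.pyGet? L (k : Int)).getD ("", [])

-- breaks[k] = (k == 0 or len(items[k][1]) != len(items[k-1][1])); at k = 0 Python
-- short-circuits, so the second operand's value is irrelevant there (Nat k-1 = 0 then)
def bBreaks (items : List (String × List Int)) : List Bool :=
  (List.range 4).map (fun k =>
    decide (k = 0) ||
      !decide ((items.getD k ("", [])).2.length = (items.getD (k - 1) ("", [])).2.length))

-- labels[k] = sum(breaks[:k+1]) (number of break points up to k)
def bLabels (breaks : List Bool) : List Nat :=
  (List.range 4).map (fun k => ((breaks.take (k + 1)).filter id).length)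

-- [([k+1 ...], [items[k][0] ...]) for g in range(1, labels[3]+1)]
def all_ties_main_alt (results_group : List (String × List Int)) : List (List Int × List String) :=
  let items := (List.range 4).map (fun k => pvBget results_group k)
  let labels := bLabels (bBreaks items)
  (List.range (labels.getD 3 0)).map (fun g0 =>
    (((List.range 4).filter (fun k => labels.getD k 0 = g0 + 1)).map (fun k => ((k : Int) + 1)),
     ((List.range 4).filter (fun k => labels.getD k 0 = g0 + 1)).map
       (fun k => (items.getD k ("", [])).1)))

-- ===== PRECONDITION & SPEC =====
-- Pre_ excludes lists shorter than 4 (A raises IndexError there) and association lists with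
-- duplicate keys, which represent no Python dict (Python collapses duplicates before either
-- program runs, while the Lean ports read the raw list).
def Pre_all_ties_main (results_group : List (String × List Int)) : Prop :=
  4 ≤ results_group.length ∧ (results_group.map Prod.fst).Nodup
instance (results_group : List (String × List Int)) : Decidable (Pre_all_ties_main results_group) := by unfold Pre_all_ties_main; infer_instance

def pvWitness_all_ties_main : (List (String × List Int)) :=
  [("a", [1, 2]), ("b", [3, 4]), ("c", [5]), ("d", [])]

def Spec_all_ties_main (results_group : List (String × List Int)) (out : List (List Int × List String)) : Prop := out = all_ties_main_alt results_group
instance (results_group : List (String × List Int)) (out : List (List Int × List String)) : Decidable (Spec_all_ties_main results_group out) := by unfold Spec_all_ties_main; infer_instance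

-- ===== CLAIM (what is proved, stated in full; the proofs are below) =====
def Claim_equal_all_ties_main : Prop := ∀ (results_group : List (String × List Int)), Dom_all_ties_main results_group → Pre_all_ties_main results_group → Spec_all_ties_main results_group (all_ties_main results_group)

-- ===== LEMMAS AND PROOFS =====

theorem gA0 (e0 e1 e2 e3 : String × List Int) (rest : List (String × List Int)) :
    pvAget (e0::e1::e2::e3::rest) 0 = e0 := by
  rw [pvAget, show (0:Int) = ((0:Nat):Int) from rfl, PySem.List.pyGet?_natCast]; rfl
theorem gA1 (e0 e1 e2 e3 : String × List Int) (rest : List (String × List Int)) :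
    pvAget (e0::e1::e2::e3::rest) 1 = e1 := by
  rw [pvAget, show (1:Int) = ((1:Nat):Int) from rfl, PySem.List.pyGet?_natCast]; rfl
theorem gA2 (e0 e1 e2 e3 : String × List Int) (rest : List (String × List Int)) :
    pvAget (e0::e1::e2::e3::rest) 2 = e2 := by
  rw [pvAget, show (2:Int) = ((2:Nat):Int) from rfl, PySem.List.pyGet?_natCast]; rfl
theorem gA3 (e0 e1 e2 e3 : String × List Int) (rest : List (String × List Int)) :
    pvAget (e0::e1::e2::e3::rest) 3 = e3 := by
  rw [pvAget, show (3:Int) = ((3:Nat):Int) from rfl, PySem.List.pyGet?_natCast]; rfl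

theorem altB_items (e0 e1 e2 e3 : String × List Int) (rest : List (String × List Int)) :
    (List.range 4).map (fun k => pvBget (e0::e1::e2::e3::rest) k) = [e0, e1, e2, e3] := by
  simp [List.range_succ, pvBget, PySem.List.pyGet?_natCast]

theorem istep4 (L : List (String × List Int)) (rt : String × List Int) (tied : List Int × List String) (j : Int)
    (h : j < 4 ∧ rt.2.length = (pvAget L j).2.length) :
    all_ties_innerA L rt tied j 4
      = all_ties_innerA L rt (tied.1 ++ [j + 1], tied.2 ++ [(pvAget L j).1]) (j + 1) 3 := by
  conv_lhs => rw [show (4:Nat) = 3 + 1 from rfl, all_ties_innerA]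
  rw [if_pos h]
theorem istep3 (L : List (String × List Int)) (rt : String × List Int) (tied : List Int × List String) (j : Int)
    (h : j < 4 ∧ rt.2.length = (pvAget L j).2.length) :
    all_ties_innerA L rt tied j 3
      = all_ties_innerA L rt (tied.1 ++ [j + 1], tied.2 ++ [(pvAget L j).1]) (j + 1) 2 := by
  conv_lhs => rw [show (3:Nat) = 2 + 1 from rfl, all_ties_innerA]
  rw [if_pos h]
theorem istep2 (L : List (String × List Int)) (rt : String × List Int) (tied : List Int × List String) (j : Int)
    (h : j < 4 ∧ rt.2.length = (pvAget L j).2.length) :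
    all_ties_innerA L rt tied j 2
      = all_ties_innerA L rt (tied.1 ++ [j + 1], tied.2 ++ [(pvAget L j).1]) (j + 1) 1 := by
  conv_lhs => rw [show (2:Nat) = 1 + 1 from rfl, all_ties_innerA]
  rw [if_pos h]
theorem istopF (L : List (String × List Int)) (rt : String × List Int) (tied : List Int × List String) (j : Int)
    (f : Nat) (h : ¬ (j < 4 ∧ rt.2.length = (pvAget L j).2.length)) :
    all_ties_innerA L rt tied j f = (tied, j) := by
  cases f with
  | zero => rfl
  | succ f => rw [all_ties_innerA, if_neg h]

theorem ostep4 (L : List (String × List Int)) (acc : List (List Int × List String)) (i : Int) (h : i < 4) :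
    all_ties_outerA L acc i 4
      = all_ties_outerA L
          (acc ++ [(all_ties_innerA L (pvAget L i) ([i + 1], [(pvAget L i).1]) (i + 1) 4).1])
          (all_ties_innerA L (pvAget L i) ([i + 1], [(pvAget L i).1]) (i + 1) 4).2 3 := by
  conv_lhs => rw [show (4:Nat) = 3 + 1 from rfl, all_ties_outerA]
  rw [if_pos h]
theorem ostep3 (L : List (String × List Int)) (acc : List (List Int × List String)) (i : Int) (h : i < 4) :
    all_ties_outerA L acc i 3
      = all_ties_outerA L
          (acc ++ [(all_ties_innerA L (pvAget L i) ([i + 1], [(pvAget L i).1]) (i + 1) 4).1])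
          (all_ties_innerA L (pvAget L i) ([i + 1], [(pvAget L i).1]) (i + 1) 4).2 2 := by
  conv_lhs => rw [show (3:Nat) = 2 + 1 from rfl, all_ties_outerA]
  rw [if_pos h]
theorem ostep2 (L : List (String × List Int)) (acc : List (List Int × List String)) (i : Int) (h : i < 4) :
    all_ties_outerA L acc i 2
      = all_ties_outerA L
          (acc ++ [(all_ties_innerA L (pvAget L i) ([i + 1], [(pvAget L i).1]) (i + 1) 4).1])
          (all_ties_innerA L (pvAget L i) ([i + 1], [(pvAget L i).1]) (i + 1) 4).2 1 := by
  conv_lhs => rw [show (2:Nat) = 1 + 1 from rfl, all_ties_outerA]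
  rw [if_pos h]
theorem ostep1 (L : List (String × List Int)) (acc : List (List Int × List String)) (i : Int) (h : i < 4) :
    all_ties_outerA L acc i 1
      = all_ties_outerA L
          (acc ++ [(all_ties_innerA L (pvAget L i) ([i + 1], [(pvAget L i).1]) (i + 1) 4).1])
          (all_ties_innerA L (pvAget L i) ([i + 1], [(pvAget L i).1]) (i + 1) 4).2 0 := by
  conv_lhs => rw [show (1:Nat) = 0 + 1 from rfl, all_ties_outerA]
  rw [if_pos h]
theorem ostopF (L : List (String × List Int)) (acc : List (List Int × List String)) (i : Int)
    (f : Nat) (h : ¬ i < 4) :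
    all_ties_outerA L acc i f = acc := by
  cases f with
  | zero => rfl
  | succ f => rw [all_ties_outerA, if_neg h]

theorem cl0 : (0:Int) < 4 := by norm_num
theorem cl1 : (1:Int) < 4 := by norm_num
theorem cl2 : (2:Int) < 4 := by norm_num
theorem cl3 : (3:Int) < 4 := by norm_num
theorem ncl4 : ¬ ((4:Int) < 4) := by norm_num

set_option maxHeartbeats 1600000 in
set_option maxRecDepth 8192 in
theorem key_lemma (e0 e1 e2 e3 : String × List Int) (rest : List (String × List Int)) :
    all_ties_main (e0 :: e1 :: e2 :: e3 :: rest) = all_ties_main_alt (e0 :: e1 :: e2 :: e3 :: rest) := by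
  rw [all_ties_main, all_ties_main_alt, altB_items]
  by_cases h01 : e0.2.length = e1.2.length <;>
  by_cases h12 : e1.2.length = e2.2.length <;>
  by_cases h23 : e2.2.length = e3.2.length <;>
  [ skip;
    (have h32 : ¬ e3.2.length = e2.2.length := fun h => h23 h.symm);
    (have h13 : ¬ e1.2.length = e3.2.length := fun h => h12 (h.trans h23.symm)
     have h31 : ¬ e3.2.length = e1.2.length := fun h => h13 h.symm);
    (have h21 : ¬ e2.2.length = e1.2.length := fun h => h12 h.symm
     have h32 : ¬ e3.2.length = e2.2.length := fun h => h23 h.symm);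
    (have h03 : ¬ e0.2.length = e3.2.length := fun h => h01 (h.trans (h12.trans h23).symm)
     have h30 : ¬ e3.2.length = e0.2.length := fun h => h03 h.symm);
    (have h02 : ¬ e0.2.length = e2.2.length := fun h => h01 (h.trans h12.symm)
     have h20 : ¬ e2.2.length = e0.2.length := fun h => h02 h.symm
     have h10 : ¬ e1.2.length = e0.2.length := fun h => h01 h.symm
     have h32 : ¬ e3.2.length = e2.2.length := fun h => h23 h.symm);
    (have h10 : ¬ e1.2.length = e0.2.length := fun h => h01 h.symm
     have h13 : ¬ e1.2.length = e3.2.length := fun h => h12 (h.trans h23.symm)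
     have h31 : ¬ e3.2.length = e1.2.length := fun h => h13 h.symm
     have h21 : ¬ e2.2.length = e1.2.length := fun h => h12 h.symm);
    (have h10 : ¬ e1.2.length = e0.2.length := fun h => h01 h.symm
     have h21 : ¬ e2.2.length = e1.2.length := fun h => h12 h.symm
     have h32 : ¬ e3.2.length = e2.2.length := fun h => h23 h.symm) ] <;>
  simp_all [istep4, istep3, istep2, istopF, ostep4, ostep3, ostep2, ostep1, ostopF,
    gA0, gA1, gA2, gA3, cl0, cl1, cl2, cl3, ncl4,
    bBreaks, bLabels, List.range_succ]

-- ===== VERDICT (by name: the statement is the Claim_ definition above) =====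
theorem all_ties_main_spec : Claim_equal_all_ties_main := by
  intro L _ hpre
  unfold Spec_all_ties_main
  match L, hpre with
  | e0 :: e1 :: e2 :: e3 :: rest, _ => exact key_lemma e0 e1 e2 e3 rest
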